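-- pv_equiv track=rewrite | github.com/ikhlasbhojani/learnme | python-service/app/agents/quiz_analysis_agent.py | calculate_difficulty_stats
-- ===== SOURCE A (Python) =====
-- def calculate_difficulty_stats(questions: list, answers: dict) -> dict:
--     """Calculate performance statistics by difficulty level. Returns dict with difficulty as key and stats as value."""
--     difficulty_stats = {}
--     for question in questions:
--         diff = question.get("difficulty", "Normal")
--         if diff not in difficulty_stats:
--             difficulty_stats[diff] = {"correct": 0, "total": 0, "incorrect": 0}
--         difficulty_stats[diff]["total"] += 1
--
--         user_answer = answers.get(question.get("id"))
--         if user_answer: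
--             is_correct = user_answer == question.get("correctAnswer")
--             if is_correct:
--                 difficulty_stats[diff]["correct"] += 1
--             else:
--                 difficulty_stats[diff]["incorrect"] += 1
--     return difficulty_stats
-- ===== SOURCE B (Python) =====
-- def calculate_difficulty_stats(questions: list, answers: dict) -> dict:
--     """Calculate performance statistics by difficulty level. Returns dict with difficulty as key and stats as value."""
--     groups = {}
--     for question in questions:
--         groups.setdefault(question.get("difficulty", "Normal"), []).append(question)
--     result = {}
--     for diff, qs in groups.items():
--         correct = sum(1 for q in qs
--                       if answers.get(q.get("id")) and answers.get(q.get("id")) == q.get("correctAnswer"))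
--         incorrect = sum(1 for q in qs
--                         if answers.get(q.get("id")) and answers.get(q.get("id")) != q.get("correctAnswer"))
--         result[diff] = {"correct": correct, "total": len(qs), "incorrect": incorrect}
--     return result
-- ===== Notes on version B (the rewrite author's own statement) =====
-- stated objective: alternative
-- what changed: A builds the per-difficulty stats incrementally in one loop with interleaved nested-dict updates; B first groups the questions by difficulty in one pass and then computes each bucket's correct/total/incorrect counts per group, a group-then-count decomposition.
import Mathlib
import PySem

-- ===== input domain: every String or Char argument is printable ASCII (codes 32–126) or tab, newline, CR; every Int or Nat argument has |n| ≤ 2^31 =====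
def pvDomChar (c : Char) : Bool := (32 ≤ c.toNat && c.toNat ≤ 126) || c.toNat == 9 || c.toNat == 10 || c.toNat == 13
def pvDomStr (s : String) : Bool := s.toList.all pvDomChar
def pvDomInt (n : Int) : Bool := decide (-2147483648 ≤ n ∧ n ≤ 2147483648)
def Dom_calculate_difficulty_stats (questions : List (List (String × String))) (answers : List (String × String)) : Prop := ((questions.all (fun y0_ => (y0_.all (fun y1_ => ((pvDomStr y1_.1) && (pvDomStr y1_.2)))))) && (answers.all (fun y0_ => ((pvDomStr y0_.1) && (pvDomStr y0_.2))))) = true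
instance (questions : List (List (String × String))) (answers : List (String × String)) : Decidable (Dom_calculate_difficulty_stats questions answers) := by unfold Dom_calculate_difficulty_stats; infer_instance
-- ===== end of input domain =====

-- B replaces A's single loop over interleaved nested-dict updates by a group-then-count decomposition
-- (one grouping pass by difficulty, then per-group counts); objective: alternative structure, same cost.

-- ===== PORT A =====
-- one loop iteration of A: ensure the bucket exists, bump "total", then maybe bump "correct"/"incorrect"
def pvStepA (answers : List (String × String)) (d : PySem.Dict String (PySem.Dict String Int))
    (question : List (String × String)) : PySem.Dict String (PySem.Dict String Int) :=
  let diff := (question.lookup "difficulty").getD "Normal"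
  let d := if d.contains diff then d
           else d.insert diff (PySem.Dict.mk [("correct", 0), ("total", 0), ("incorrect", 0)])
  let d := d.modify diff PySem.Dict.empty (fun s => s.modify "total" 0 (· + 1))
  match (question.lookup "id").bind (fun i => answers.lookup i) with
  | none => d
  | some user_answer =>
    if user_answer != "" then
      if question.lookup "correctAnswer" == some user_answer then
        d.modify diff PySem.Dict.empty (fun s => s.modify "correct" 0 (· + 1))
      else
        d.modify diff PySem.Dict.empty (fun s => s.modify "incorrect" 0 (· + 1))
    else d

def calculate_difficulty_stats (questions : List (List (String × String))) (answers : List (String × String)) : List (String × List (String × Int)) :=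
  ((questions.foldl (pvStepA answers) PySem.Dict.empty).items.map (fun p => (p.1, p.2.items)))

-- ===== PORT B =====
def pvAnsOf (answers : List (String × String)) (q : List (String × String)) : Option String :=
  (q.lookup "id").bind (fun i => answers.lookup i)

def pvIsCorrect (answers : List (String × String)) (q : List (String × String)) : Bool :=
  match pvAnsOf answers q with
  | some ua => ua != "" && (q.lookup "correctAnswer" == some ua)
  | none => false

def pvIsIncorrect (answers : List (String × String)) (q : List (String × String)) : Bool :=
  match pvAnsOf answers q with
  | some ua => ua != "" && !(q.lookup "correctAnswer" == some ua)
  | none => false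

def calculate_difficulty_stats_alt (questions : List (List (String × String))) (answers : List (String × String)) : List (String × List (String × Int)) :=
  (questions.foldl
    (fun d q => d.modify ((q.lookup "difficulty").getD "Normal") [] (· ++ [q])) PySem.Dict.empty).items.map (fun p =>
    (p.1, [("correct", ((p.2.countP (pvIsCorrect answers)) : Int)),
           ("total", ((p.2.length : Nat) : Int)),
           ("incorrect", ((p.2.countP (pvIsIncorrect answers)) : Int))]))

-- ===== PRECONDITION & SPEC =====
def Spec_calculate_difficulty_stats (questions : List (List (String × String))) (answers : List (String × String)) (out : List (String × List (String × Int))) : Prop := out = calculate_difficulty_stats_alt questions answers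
instance (questions : List (List (String × String))) (answers : List (String × String)) (out : List (String × List (String × Int))) : Decidable (Spec_calculate_difficulty_stats questions answers out) := by unfold Spec_calculate_difficulty_stats; infer_instance

-- ===== CLAIM (what is proved, stated in full; the proofs are below) =====
def Claim_equal_calculate_difficulty_stats : Prop := ∀ (questions : List (List (String × String))) (answers : List (String × String)), Dom_calculate_difficulty_stats questions answers → Spec_calculate_difficulty_stats questions answers (calculate_difficulty_stats questions answers)

-- ===== LEMMAS AND PROOFS =====

-- the difficulty key of a question
def pvDiffOf (q : List (String × String)) : String := (q.lookup "difficulty").getD "Normal"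

-- the inner stats dict A ends up with for the bucket holding questions l
def pvStats (answers : List (String × String)) (l : List (List (String × String))) : PySem.Dict String Int :=
  PySem.Dict.mk [("correct", ((l.countP (pvIsCorrect answers)) : Int)),
                 ("total", ((l.length : Nat) : Int)),
                 ("incorrect", ((l.countP (pvIsIncorrect answers)) : Int))]

-- the outer dict A's loop has built after processing prefix p
def pvSpecD (answers : List (String × String)) (p : List (List (String × String))) : PySem.Dict String (PySem.Dict String Int) :=
  PySem.Dict.mk ((PySem.List.dedup (p.map pvDiffOf)).map
    (fun k => (k, pvStats answers (p.filter (fun q => pvDiffOf q == k)))))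

-- A's fresh bucket literal is the stats of the empty group
def pvInit : PySem.Dict String Int := PySem.Dict.mk [("correct", 0), ("total", 0), ("incorrect", 0)]

-- the composite update A applies to the inner dict of bucket (pvDiffOf q) when processing q
def pvF (answers : List (String × String)) (q : List (String × String)) (s : PySem.Dict String Int) : PySem.Dict String Int :=
  match (q.lookup "id").bind (fun i => answers.lookup i) with
  | none => s.modify "total" 0 (· + 1)
  | some ua =>
    if ua != "" then
      if q.lookup "correctAnswer" == some ua then (s.modify "total" 0 (· + 1)).modify "correct" 0 (· + 1)
      else (s.modify "total" 0 (· + 1)).modify "incorrect" 0 (· + 1)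
    else s.modify "total" 0 (· + 1)

lemma pvModifyD (d : PySem.Dict String (PySem.Dict String Int)) (k : String) (f : PySem.Dict String Int → PySem.Dict String Int) :
    d.modify k PySem.Dict.empty f = d.insert k (f (d.getD k PySem.Dict.empty)) := rfl

lemma pvStepA_eq (answers : List (String × String)) (d : PySem.Dict String (PySem.Dict String Int)) (q : List (String × String)) :
    pvStepA answers d q =
      (if d.contains (pvDiffOf q) then d else d.insert (pvDiffOf q) pvInit).insert (pvDiffOf q)
        (pvF answers q ((if d.contains (pvDiffOf q) then d else d.insert (pvDiffOf q) pvInit).getD (pvDiffOf q) PySem.Dict.empty)) := by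
  unfold pvStepA pvF pvInit pvDiffOf
  cases hua : (q.lookup "id").bind (fun i => answers.lookup i) with
  | none => simp only [pvModifyD]
  | some ua =>
      simp only [pvModifyD]
      split_ifs <;>
        simp only [PySem.Dict.insert_insert_self, PySem.Dict.getD_insert_self]

lemma pvBump_correct (x y z : Int) (f : Int → Int) :
    (PySem.Dict.mk [("correct", x), ("total", y), ("incorrect", z)]).modify "correct" 0 f
      = PySem.Dict.mk [("correct", f x), ("total", y), ("incorrect", z)] := by
  apply PySem.Dict.ext
  rw [show ∀ (d : PySem.Dict String Int) k f, d.modify k 0 f = d.insert k (f (d.getD k 0)) from fun _ _ _ => rfl]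
  simp [PySem.Dict.items_insert, PySem.Dict.getD_eq_get?_getD, PySem.Dict.get?_mk_cons]

lemma pvBump_total (x y z : Int) (f : Int → Int) :
    (PySem.Dict.mk [("correct", x), ("total", y), ("incorrect", z)]).modify "total" 0 f
      = PySem.Dict.mk [("correct", x), ("total", f y), ("incorrect", z)] := by
  apply PySem.Dict.ext
  rw [show ∀ (d : PySem.Dict String Int) k f, d.modify k 0 f = d.insert k (f (d.getD k 0)) from fun _ _ _ => rfl]
  simp [PySem.Dict.items_insert, PySem.Dict.getD_eq_get?_getD, PySem.Dict.get?_mk_cons]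

lemma pvBump_incorrect (x y z : Int) (f : Int → Int) :
    (PySem.Dict.mk [("correct", x), ("total", y), ("incorrect", z)]).modify "incorrect" 0 f
      = PySem.Dict.mk [("correct", x), ("total", y), ("incorrect", f z)] := by
  apply PySem.Dict.ext
  rw [show ∀ (d : PySem.Dict String Int) k f, d.modify k 0 f = d.insert k (f (d.getD k 0)) from fun _ _ _ => rfl]
  simp [PySem.Dict.items_insert, PySem.Dict.getD_eq_get?_getD, PySem.Dict.get?_mk_cons]

lemma pvF_stats (answers : List (String × String)) (q : List (String × String)) (l : List (List (String × String))) :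
    pvF answers q (pvStats answers l) = pvStats answers (l ++ [q]) := by
  unfold pvF pvStats
  cases hua : (q.lookup "id").bind (fun i => answers.lookup i) with
  | none =>
      simp [pvBump_total, List.countP_append, pvIsCorrect, pvIsIncorrect, pvAnsOf, hua,
        List.countP_nil, Nat.cast_add]
  | some ua =>
      by_cases hne : ua != ""
      · by_cases hca : q.lookup "correctAnswer" == some ua
        · simp [hua, hne, hca, pvBump_total, pvBump_correct, List.countP_append,
            pvIsCorrect, pvIsIncorrect, pvAnsOf, List.countP_nil, Nat.cast_add]
        · simp [hua, hne, hca, pvBump_total, pvBump_incorrect, List.countP_append,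
            pvIsCorrect, pvIsIncorrect, pvAnsOf, List.countP_nil, Nat.cast_add]
      · simp [hua, hne, pvBump_total, List.countP_append,
          pvIsCorrect, pvIsIncorrect, pvAnsOf, List.countP_nil, Nat.cast_add]

lemma pvDedup_snoc (l : List String) (x : String) :
    PySem.List.dedup (l ++ [x]) = if x ∈ l then PySem.List.dedup l else PySem.List.dedup l ++ [x] := by
  simp only [PySem.List.dedup_eq_ofList, PySem.Set.ofList_eq_foldl, List.foldl_append,
    List.foldl_cons, List.foldl_nil]
  rw [← PySem.Set.ofList_eq_foldl]
  by_cases h : x ∈ l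
  · simp [PySem.Set.add, h, PySem.Set.contains, PySem.Set.mem_ofList]
  · simp [PySem.Set.add, h, PySem.Set.contains, PySem.Set.mem_ofList]

lemma pvKeys_spec (answers : List (String × String)) (p : List (List (String × String))) :
    (pvSpecD answers p).keys = PySem.List.dedup (p.map pvDiffOf) := by
  simp [pvSpecD, PySem.Dict.keys, Function.comp_def]

lemma pvContains_spec (answers : List (String × String)) (p : List (List (String × String))) (k : String) :
    (pvSpecD answers p).contains k = decide (k ∈ p.map pvDiffOf) := by
  rw [PySem.Dict.contains_eq_decide_mem_keys, pvKeys_spec]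
  simp

lemma pvNodupKeys (answers : List (String × String)) (p : List (List (String × String))) :
    (pvSpecD answers p).keys.Nodup := by
  rw [pvKeys_spec]; exact PySem.List.nodup_dedup _

lemma pvGetD_spec (answers : List (String × String)) (p : List (List (String × String))) (k : String)
    (hmem : k ∈ p.map pvDiffOf) :
    (pvSpecD answers p).getD k PySem.Dict.empty = pvStats answers (p.filter (fun q => pvDiffOf q == k)) := by
  have hmi : (k, pvStats answers (p.filter (fun q => pvDiffOf q == k))) ∈ (pvSpecD answers p).items :=
    List.mem_map_of_mem ((PySem.List.mem_dedup _ _).mpr hmem)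
  exact PySem.Dict.getD_of_mem_items (pvSpecD answers p) hmi (pvNodupKeys answers p) _

lemma pvStepA_spec (answers : List (String × String)) (p : List (List (String × String))) (q : List (String × String)) :
    pvStepA answers (pvSpecD answers p) q = pvSpecD answers (p ++ [q]) := by
  rw [pvStepA_eq, pvContains_spec]
  by_cases hmem : pvDiffOf q ∈ p.map pvDiffOf
  · simp only [hmem, decide_true, if_pos]
    rw [pvGetD_spec answers p _ hmem, pvF_stats]
    apply PySem.Dict.ext
    rw [PySem.Dict.items_insert_of_contains _ _ (by rw [pvContains_spec]; simp [hmem])]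
    show (pvSpecD answers p).items.map _ = (pvSpecD answers (p ++ [q])).items
    simp only [pvSpecD, List.map_append, List.map_cons, List.map_nil, pvDedup_snoc, hmem, if_pos,
      List.map_map]
    apply List.map_congr_left
    intro k' hk'
    by_cases hkk : k' = pvDiffOf q
    · subst hkk
      simp [List.filter_append]
    · have h1 : (k' == pvDiffOf q) = false := by simp [hkk]
      have h2 : (pvDiffOf q == k') = false := by simp [Ne.symm hkk]
      simp [Function.comp, h1, h2, List.filter_append]
  · rw [if_neg (by simp [hmem])]
    rw [PySem.Dict.getD_insert_self, PySem.Dict.insert_insert_self]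
    have hinit : pvInit = pvStats answers [] := rfl
    rw [hinit, pvF_stats]
    apply PySem.Dict.ext
    rw [PySem.Dict.items_insert_of_not_contains _ _ (by rw [pvContains_spec]; simp [hmem])]
    show (pvSpecD answers p).items ++ _ = (pvSpecD answers (p ++ [q])).items
    simp only [pvSpecD, List.map_append, List.map_cons, List.map_nil, pvDedup_snoc]
    rw [if_neg hmem]
    have hfil : p.filter (fun x => pvDiffOf x == pvDiffOf q) = [] := by
      rw [List.filter_eq_nil_iff]
      intro x hx
      simp only [beq_iff_eq]
      exact fun h => hmem (h ▸ List.mem_map_of_mem hx)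
    rw [List.map_append]
    congr 1
    · apply List.map_congr_left
      intro k' hk'
      have hk'mem : k' ∈ p.map pvDiffOf := (PySem.List.mem_dedup _ _).mp hk'
      have h2 : (pvDiffOf q == k') = false := by
        simp only [beq_eq_false_iff_ne, ne_eq]
        exact fun h => hmem (h ▸ hk'mem)
      simp [h2, List.filter_append]
    · simp [List.filter_append, hfil]

lemma pvFoldA_spec (answers : List (String × String)) (qs p : List (List (String × String))) :
    qs.foldl (pvStepA answers) (pvSpecD answers p) = pvSpecD answers (p ++ qs) := by
  induction qs generalizing p with
  | nil => simp
  | cons q qs ih =>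
      simp only [List.foldl_cons, pvStepA_spec]
      rw [ih]; simp

lemma pvGroups_getD (qs : List (List (String × String)))
    (d : PySem.Dict String (List (List (String × String)))) (k : String) :
    (qs.foldl (fun d q => d.modify ((q.lookup "difficulty").getD "Normal") [] (· ++ [q])) d).getD k []
      = d.getD k [] ++ qs.filter (fun q => pvDiffOf q == k) := by
  induction qs generalizing d with
  | nil => simp
  | cons q qs ih =>
      simp only [List.foldl_cons, ih, List.filter_cons, pvDiffOf]
      by_cases h : ((q.lookup "difficulty").getD "Normal") = k
      · simp [h]
      · simp [h, PySem.Dict.getD_modify, Ne.symm h]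

lemma pvGroups_items (qs : List (List (String × String))) :
    (qs.foldl (fun d q => d.modify ((q.lookup "difficulty").getD "Normal") [] (· ++ [q])) (PySem.Dict.empty)).items
      = (PySem.List.dedup (qs.map pvDiffOf)).map (fun k => (k, qs.filter (fun q => pvDiffOf q == k))) := by
  have hk : (qs.foldl (fun d q => d.modify ((q.lookup "difficulty").getD "Normal") [] (· ++ [q])) (PySem.Dict.empty : PySem.Dict String (List (List (String × String))))).keys
      = PySem.List.dedup (qs.map pvDiffOf) := by
    rw [PySem.Dict.keys_foldl_modify_key]
    simp [PySem.Set.update, PySem.Set.ofList_eq_foldl, PySem.Dict.keys_empty]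
    rfl
  have hnd : (qs.foldl (fun d q => d.modify ((q.lookup "difficulty").getD "Normal") [] (· ++ [q])) (PySem.Dict.empty : PySem.Dict String (List (List (String × String))))).keys.Nodup := by
    rw [hk]; exact PySem.List.nodup_dedup _
  rw [PySem.Dict.items_eq_map_keys _ hnd [], hk]
  apply List.map_congr_left
  intro k hkm
  rw [pvGroups_getD]
  simp

-- ===== VERDICT (by name: the statement is the Claim_ definition above) =====
theorem calculate_difficulty_stats_spec : Claim_equal_calculate_difficulty_stats := by
  intro questions answers _
  unfold Spec_calculate_difficulty_stats calculate_difficulty_stats calculate_difficulty_stats_alt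
  have h0 : (PySem.Dict.empty : PySem.Dict String (PySem.Dict String Int)) = pvSpecD answers [] := rfl
  rw [h0, pvFoldA_spec, pvGroups_items]
  simp only [List.nil_append, pvSpecD, List.map_map]
  rfl
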